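-- pv_equiv track=rewrite | github.com/samvv/Templaty | src/templaty/util.py | ends_with_newline
-- ===== SOURCE A (Python) =====
-- def ends_with_newline(text: str) -> bool:
--     for ch in reversed(text):
--         if ch == '\n':
--             return True
--         if ch == ' ' or ch == '\t' or ch == '\r':
--             continue
--         break
--     return False
-- ===== SOURCE B (Python) =====
-- def ends_with_newline(text: str) -> bool:
--     idx = text.rfind('\n')
--     if idx == -1:
--         return False
--     return all(c in ' \t\r' for c in text[idx + 1:])
-- ===== Notes on version B (the rewrite author's own statement) =====
-- stated objective: alternative
-- what changed: Replaces the early-breaking backward scan with a pivot-then-verify decomposition: find the last newline with rfind, then check that the whole suffix after it is whitespace in one forward pass.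
import Mathlib
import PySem

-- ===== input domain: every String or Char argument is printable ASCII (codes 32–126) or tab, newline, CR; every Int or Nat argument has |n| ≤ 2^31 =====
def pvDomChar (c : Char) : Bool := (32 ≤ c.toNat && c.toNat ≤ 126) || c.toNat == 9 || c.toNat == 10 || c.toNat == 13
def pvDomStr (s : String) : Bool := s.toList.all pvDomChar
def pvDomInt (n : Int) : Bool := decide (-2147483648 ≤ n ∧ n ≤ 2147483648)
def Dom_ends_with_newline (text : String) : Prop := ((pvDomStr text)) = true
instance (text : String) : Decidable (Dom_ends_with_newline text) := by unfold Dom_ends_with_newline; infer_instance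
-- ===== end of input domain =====

-- B replaces A's early-breaking backward scan by a pivot-then-verify decomposition
-- (locate the last newline, then check the suffix after it is all whitespace);
-- objective: alternative (same cost, different strategy).

-- ===== PORT A =====
-- the 'for ch in reversed(text)' loop with its return/continue/break, as structural recursion
def pvLoopA : List Char → Bool
  | [] => false
  | c :: rest =>
    if c = '\n' then true
    else if c = ' ' || c = '\t' || c = '\r' then pvLoopA rest
    else false

def ends_with_newline (text : String) : Bool := pvLoopA text.toList.reverse

-- ===== PORT B =====
-- text.rfind('\n'): index of the last '\n', -1 if none (one forward pass keeping the last hit)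
def pvRfindNl (l : List Char) : Int :=
  (l.foldl (fun (st : Int × Int) c => (if c = '\n' then st.2 else st.1, st.2 + 1)) (-1, 0)).1

def ends_with_newline_alt (text : String) : Bool :=
  let idx := pvRfindNl text.toList
  if idx = -1 then false
  else
    -- text[idx+1:] : since idx+1 ≥ 0, the Python slice is exactly 'drop (idx+1)'
    (text.toList.drop (idx + 1).toNat).all (fun c => c = ' ' || c = '\t' || c = '\r')

-- ===== PRECONDITION & SPEC =====
def Spec_ends_with_newline (text : String) (out : Bool) : Prop := out = ends_with_newline_alt text
instance (text : String) (out : Bool) : Decidable (Spec_ends_with_newline text out) := by unfold Spec_ends_with_newline; infer_instance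

-- ===== CLAIM (what is proved, stated in full; the proofs are below) =====
def Claim_equal_ends_with_newline : Prop := ∀ (text : String), Dom_ends_with_newline text → Spec_ends_with_newline text (ends_with_newline text)

-- ===== LEMMAS AND PROOFS =====

theorem pvRfind_snd (l : List Char) (st : Int × Int) :
    (l.foldl (fun (st : Int × Int) c => (if c = '\n' then st.2 else st.1, st.2 + 1)) st).2
      = st.2 + l.length := by
  induction l generalizing st with
  | nil => simp
  | cons c rest ih => simp [List.foldl, ih]; omega

theorem pvRfindNl_append (l : List Char) (c : Char) :
    pvRfindNl (l ++ [c]) = if c = '\n' then (l.length : Int) else pvRfindNl l := by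
  unfold pvRfindNl
  rw [List.foldl_append]
  simp [List.foldl, pvRfind_snd]

theorem pvRfindNl_lt (l : List Char) : pvRfindNl l < l.length := by
  induction l using List.reverseRecOn with
  | nil => simp [pvRfindNl]
  | append_singleton l c ih =>
    rw [pvRfindNl_append]
    simp only [List.length_append, List.length_cons, List.length_nil]
    split <;> omega

theorem pvRfindNl_ge (l : List Char) : -1 ≤ pvRfindNl l := by
  induction l using List.reverseRecOn with
  | nil => simp [pvRfindNl]
  | append_singleton l c ih =>
    rw [pvRfindNl_append]
    split <;> omega

-- the alt body, as a function of the char list (to do list induction)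
def pvAltL (l : List Char) : Bool :=
  let idx := pvRfindNl l
  if idx = -1 then false
  else (l.drop (idx + 1).toNat).all (fun c => c = ' ' || c = '\t' || c = '\r')

theorem pvAltL_append (l : List Char) (c : Char) :
    pvAltL (l ++ [c]) =
      (if c = '\n' then true
       else if c = ' ' || c = '\t' || c = '\r' then pvAltL l
       else false) := by
  unfold pvAltL
  rw [pvRfindNl_append]
  by_cases hc : c = '\n'
  · have hne : (l.length : Int) ≠ -1 := by omega
    simp [hc, hne]
  · rw [if_neg hc, if_neg hc]
    by_cases h0 : pvRfindNl l = -1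
    · simp only [h0, if_true]
      by_cases hws : (c = ' ' || c = '\t' || c = '\r') = true <;> simp [hws]
    · have hlt := pvRfindNl_lt l
      have hge := pvRfindNl_ge l
      rw [if_neg h0, if_neg h0]
      have hdrop : (l ++ [c]).drop (pvRfindNl l + 1).toNat
          = l.drop (pvRfindNl l + 1).toNat ++ [c] := by
        rw [List.drop_append_of_le_length]
        omega
      rw [hdrop, List.all_append]
      by_cases hws : c = ' ' || c = '\t' || c = '\r'
      · simp [hws]
      · simp [hws]

theorem pvLoop_eq_alt (l : List Char) : pvLoopA l.reverse = pvAltL l := by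
  induction l using List.reverseRecOn with
  | nil => simp [pvLoopA, pvAltL, pvRfindNl]
  | append_singleton l c ih =>
    rw [List.reverse_append, pvAltL_append]
    simp only [List.reverse_cons, List.reverse_nil, List.nil_append, List.singleton_append]
    rw [pvLoopA]
    split
    · rfl
    · split
      · exact ih
      · rfl

-- ===== VERDICT (by name: the statement is the Claim_ definition above) =====
theorem ends_with_newline_spec : Claim_equal_ends_with_newline := by
  intro text _
  unfold Spec_ends_with_newline ends_with_newline ends_with_newline_alt
  exact pvLoop_eq_alt text.toList
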